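-- pv_equiv track=rewrite | github.com/Mikescher/www.mikescher.com | www/statics/aoc/2017/09_solution-2.py | read_garbage
-- ===== SOURCE A (Python) =====
-- def read_garbage(data: str):
--     assert data[0] == '<'
--     pos = 1
--
--     gstr = ''
--
--     escaped = False
--     while True:
--         if escaped:
--             escaped = False
--         elif data[pos] == '>':
--             return gstr, pos+1
--         elif data[pos] == '!':
--             escaped = True
--         else:
--             gstr += data[pos]
--         pos+=1
-- ===== SOURCE B (Python) =====
-- def read_garbage(data: str):
--     assert data[0] == '<'
--     pos = 1
--     out = ''
--     while True:
--         g = data.find('>', pos)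
--         if g == -1:
--             raise ValueError("unterminated garbage")
--         b = data.find('!', pos)
--         if b == -1 or g < b:
--             return out + data[pos:g], g + 1
--         out += data[pos:b]
--         pos = b + 2
-- ===== Notes on version B (the rewrite author's own statement) =====
-- stated objective: alternative
-- what changed: Replaces A's per-character escaped-flag state machine by a delimiter-jumping scan: str.find locates the next '>' and the next '!', whole plain runs are copied at once by slicing, and on an escape the position jumps past the escaped pair.
import Mathlib
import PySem

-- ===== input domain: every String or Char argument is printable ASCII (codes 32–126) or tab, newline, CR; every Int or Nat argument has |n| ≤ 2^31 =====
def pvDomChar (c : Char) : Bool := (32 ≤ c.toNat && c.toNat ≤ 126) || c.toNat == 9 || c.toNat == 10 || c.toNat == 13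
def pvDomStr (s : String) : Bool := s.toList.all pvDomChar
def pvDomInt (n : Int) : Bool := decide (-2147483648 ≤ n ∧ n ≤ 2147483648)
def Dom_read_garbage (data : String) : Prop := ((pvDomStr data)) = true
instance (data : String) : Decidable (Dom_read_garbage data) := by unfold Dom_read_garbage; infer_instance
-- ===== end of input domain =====

-- B replaces A's per-character escaped-flag state machine by a delimiter-jumping scan:
-- str.find locates the next '>' and '!' and whole plain runs are copied by slicing
-- (objective: alternative decomposition; same return value; both raise outside Pre_).

-- ===== PORT A =====
-- loop of A: remaining chars from index pos, carried flag `escaped`, accumulated `gstr`;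
-- `none` = the Python loop runs off the end of the string (IndexError).
def readGarbageLoopA : List Char → Bool → Int → String → Option (String × Int)
  | [], _, _, _ => none
  | c :: rest, escaped, pos, gstr =>
    if escaped then readGarbageLoopA rest false (pos + 1) gstr
    else if c = '>' then some (gstr, pos + 1)
    else if c = '!' then readGarbageLoopA rest true (pos + 1) gstr
    else readGarbageLoopA rest false (pos + 1) (gstr.push c)

def read_garbage (data : String) : String × Int :=
  -- assert data[0] == '<' : outside Pre_ the Python raises; the port returns ("", 0) there
  match PySem.Str.pyGet? data 0 with
  | some c =>
    if c = '<' then (readGarbageLoopA (data.toList.drop 1) false 1 "").getD ("", 0)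
    else ("", 0)
  | none => ("", 0)

-- ===== PORT B =====
-- two facts about str.find used by the port's termination proof (cited in decreasing_by)
lemma findFrom_past (l : List Char) (c : Char) (k : ℕ) (h : l.length ≤ k) :
    PySem.Chars.findFrom l [c] (k : Int) none = -1 := by
  simp only [PySem.Chars.findFrom, if_neg (not_lt.mpr (Int.natCast_nonneg k)), Int.toNat_natCast]
  by_cases hlt : (l.length : Int) < (k : Int)
  · rw [if_pos hlt]
  · have hm : List.drop k (List.take l.length l) = [] := by
      rw [List.take_length]
      exact List.drop_eq_nil_of_le h
    have hfind : PySem.Chars.find ([] : List Char) [c] = -1 :=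
      (PySem.Chars.find_eq_neg_one_iff _ _).mpr (by simp)
    rw [if_neg hlt, hm, hfind]
    simp

lemma findFrom_ge (l : List Char) (c : Char) (k : ℕ) (hk : k ≤ l.length)
    (h : PySem.Chars.findFrom l [c] (k : Int) none ≠ -1) :
    (k : Int) ≤ PySem.Chars.findFrom l [c] (k : Int) none :=
  (PySem.Chars.findFrom_natCast_spec l [c] k hk h).1

-- loop of B: no per-char state; find('>',pos) and find('!',pos), return the sliced tail
-- when the '>' comes first, otherwise append the plain run and jump pos to bang+2;
-- `none` = the Python raises (ValueError in B, where A's loop raises IndexError).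
def readGarbageLoopB (data : List Char) (pos : ℕ) (out : List Char) : Option (String × Int) :=
  let g := PySem.Chars.findFrom data ['>'] (pos : Int) none
  if hg : g = -1 then none
  else
    let b := PySem.Chars.findFrom data ['!'] (pos : Int) none
    if hb : b = -1 ∨ g < b then
      some (String.ofList (out ++ PySem.List.slice data (some (pos : Int)) (some g)), g + 1)
    else
      readGarbageLoopB data (b.toNat + 2) (out ++ PySem.List.slice data (some (pos : Int)) (some b))
termination_by data.length + 1 - pos
decreasing_by
  have hplen : pos ≤ data.length := by
    by_contra hc
    exact hg (findFrom_past data '>' pos (by omega))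
  have hb' : PySem.Chars.findFrom data ['!'] (pos : Int) none ≠ -1 := by
    intro h; exact hb (Or.inl h)
  have := findFrom_ge data '!' pos hplen hb'
  omega

def read_garbage_alt (data : String) : String × Int :=
  match PySem.Str.pyGet? data 0 with
  | some c =>
    if c = '<' then (readGarbageLoopB data.toList 1 []).getD ("", 0)
    else ("", 0)
  | none => ("", 0)

-- ===== PRECONDITION & SPEC =====
-- Pre_ excludes exactly the inputs on which the Python A raises: a string not starting with '<'
-- (AssertionError, or IndexError on "") and a body with no unescaped closing '>' (IndexError);
-- a '>' is unescaped iff the maximal run of '!' immediately before it has even length.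
def Pre_read_garbage (data : String) : Prop :=
  data.toList.head? = some '<' ∧
  ∃ i < (data.toList.drop 1).length,
    (data.toList.drop 1).getD i ' ' = '>' ∧
    Even (((data.toList.drop 1).take i).reverse.takeWhile (fun c => c = '!')).length
instance (data : String) : Decidable (Pre_read_garbage data) := by
  unfold Pre_read_garbage; infer_instance

def pvWitness_read_garbage : String := "<ab!>c>"

def Spec_read_garbage (data : String) (out : String × Int) : Prop := out = read_garbage_alt data
instance (data : String) (out : String × Int) : Decidable (Spec_read_garbage data out) := by unfold Spec_read_garbage; infer_instance

-- ===== CLAIM (what is proved, stated in full; the proofs are below) =====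
def Claim_equal_read_garbage : Prop := ∀ (data : String), Dom_read_garbage data → Pre_read_garbage data → Spec_read_garbage data (read_garbage data)

-- ===== LEMMAS AND PROOFS =====

lemma stringOfList_push (l : List Char) (c : Char) :
    (String.ofList l).push c = String.ofList (l ++ [c]) := by
  have h : ((String.ofList l).push c).toList = (String.ofList (l ++ [c])).toList := by simp
  exact String.toList_inj.mp h

lemma prefix_singleton_iff (c : Char) (m : List Char) :
    [c] <+: m ↔ ∃ t, m = c :: t := by
  cases m with
  | nil => simp
  | cons x t =>
    constructor
    · intro h
      rcases (List.cons_prefix_cons.mp h) with ⟨rfl, -⟩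
      exact ⟨t, rfl⟩
    · rintro ⟨t', ht⟩
      cases ht
      exact List.cons_prefix_cons.mpr ⟨rfl, List.nil_prefix⟩

lemma loopA_no_close : ∀ (m : List Char), '>' ∉ m →
    ∀ (esc : Bool) (pos : Int) (gstr : String), readGarbageLoopA m esc pos gstr = none := by
  intro m
  induction m with
  | nil => intro _ esc pos gstr; simp [readGarbageLoopA]
  | cons c rest ih =>
    intro h esc pos gstr
    have hc : c ≠ '>' := fun hc => h (hc ▸ List.mem_cons_self)
    have hrest : '>' ∉ rest := fun hr => h (List.mem_cons_of_mem _ hr)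
    cases esc with
    | true => simpa [readGarbageLoopA] using ih hrest false (pos + 1) gstr
    | false =>
      by_cases hb : c = '!'
      · simpa [readGarbageLoopA, hc, hb] using ih hrest true (pos + 1) gstr
      · simpa [readGarbageLoopA, hc, hb] using ih hrest false (pos + 1) (gstr.push c)

lemma loopA_skip_plain : ∀ (plain : List Char), (∀ x ∈ plain, x ≠ '>' ∧ x ≠ '!') →
    ∀ (m : List Char) (pos : Int) (out : List Char),
      readGarbageLoopA (plain ++ m) false pos (String.ofList out) =
      readGarbageLoopA m false (pos + plain.length) (String.ofList (out ++ plain)) := by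
  intro plain
  induction plain with
  | nil => intro _ m pos out; simp
  | cons c rest ih =>
    intro h m pos out
    obtain ⟨hc1, hc2⟩ := h c List.mem_cons_self
    have hrest : ∀ x ∈ rest, x ≠ '>' ∧ x ≠ '!' := fun x hx => h x (List.mem_cons_of_mem _ hx)
    have := ih hrest m (pos + 1) (out ++ [c])
    simp only [readGarbageLoopA, List.cons_append, if_neg hc1, if_neg hc2]
    simp only [Bool.false_eq_true, if_false, if_neg hc1, if_neg hc2]
    rw [stringOfList_push, this]
    simp only [List.length_cons, List.append_assoc, List.singleton_append]
    congr 1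
    push_cast
    ring

lemma region_no (l : List Char) (p X : ℕ) (c : Char)
    (h : ∀ i : ℕ, p ≤ i → i < X → ¬ [c] <+: l.drop i) :
    ∀ x ∈ (l.drop p).take (X - p), x ≠ c := by
  intro x hx
  obtain ⟨j, hj, hget⟩ := List.getElem_of_mem hx
  have hjlt : j < (l.drop p).length := by
    have := hj
    simp only [List.length_take, List.length_drop] at this ⊢
    omega
  have hpj : p + j < l.length := by simp at hjlt; omega
  have hx' : x = l[p + j] := by
    rw [← hget]
    rw [List.getElem_take, List.getElem_drop]
  have hjX : p + j < X := by
    have := hj; simp only [List.length_take] at this; omega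
  intro hxc
  apply h (p + j) (by omega) hjX
  rw [prefix_singleton_iff]
  exact ⟨l.drop (p + j + 1), by rw [List.drop_eq_getElem_cons hpj, ← hx', hxc]⟩

lemma loops_agree (l : List Char) : ∀ (n pos : ℕ) (out : List Char),
    l.length + 1 - pos ≤ n →
    readGarbageLoopA (l.drop pos) false (pos : Int) (String.ofList out) =
    readGarbageLoopB l pos out := by
  intro n
  induction n with
  | zero =>
    intro pos out hn
    have hp : l.length < pos := by omega
    rw [readGarbageLoopB]
    simp only [findFrom_past l '>' pos (by omega), dite_true]
    rw [List.drop_eq_nil_of_le (by omega)]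
    simp [readGarbageLoopA]
  | succ n ih =>
    intro pos out hn
    by_cases hp : l.length < pos
    · rw [readGarbageLoopB]
      simp only [findFrom_past l '>' pos (by omega), dite_true]
      rw [List.drop_eq_nil_of_le (by omega)]
      simp [readGarbageLoopA]
    · have hplen : pos ≤ l.length := by omega
      rw [readGarbageLoopB]
      by_cases hg : PySem.Chars.findFrom l ['>'] (pos : Int) none = -1
      · simp only [hg, dite_true]
        have hno : ¬ ['>'] <:+: l.drop pos :=
          (PySem.Chars.findFrom_natCast_eq_neg_one_iff l ['>'] pos hplen).mp hg
        have : '>' ∉ l.drop pos := fun hm => hno ((List.singleton_infix_iff _ _).mpr hm)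
        exact loopA_no_close _ this false _ _
      · obtain ⟨hgle, hgpre, hgmin⟩ := PySem.Chars.findFrom_natCast_spec l ['>'] pos hplen hg
        set gI := PySem.Chars.findFrom l ['>'] (pos : Int) none with hgI
        have hg0 : 0 ≤ gI := le_trans (Int.natCast_nonneg pos) hgle
        have hgcast : gI = (gI.toNat : Int) := (Int.toNat_of_nonneg hg0).symm
        set G := gI.toNat with hGdef
        have hposG : pos ≤ G := by omega
        obtain ⟨tg, htg⟩ := (prefix_singleton_iff _ _).mp hgpre
        have hGlen : G < l.length := by
          by_contra hc
          rw [List.drop_eq_nil_of_le (by omega)] at htg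
          exact absurd htg (by simp)
        by_cases hb : PySem.Chars.findFrom l ['!'] (pos : Int) none = -1 ∨
            gI < PySem.Chars.findFrom l ['!'] (pos : Int) none
        · -- the '>' comes first: both return
          simp only [hg, dite_false, hb, dite_true, dif_neg hg, dif_pos hb]
          -- plain run before the '>' has no '>' and no '!'
          have hslice : PySem.List.slice l (some (pos : Int)) (some gI) =
              (l.drop pos).take (G - pos) := by
            rw [hgcast, PySem.List.slice_natCast]
          have hnog : ∀ x ∈ (l.drop pos).take (G - pos), x ≠ '>' :=
            region_no l pos G '>' (fun i h1 h2 => hgmin i h1 h2)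
          have hnob : ∀ x ∈ (l.drop pos).take (G - pos), x ≠ '!' := by
            rcases hb with hb1 | hb2
            · intro x hx
              have hno : ¬ ['!'] <:+: l.drop pos :=
                (PySem.Chars.findFrom_natCast_eq_neg_one_iff l ['!'] pos hplen).mp hb1
              intro hxc
              exact hno ((List.singleton_infix_iff _ _).mpr
                (hxc ▸ List.mem_of_mem_take hx))
            · have hbne : PySem.Chars.findFrom l ['!'] (pos : Int) none ≠ -1 := by omega
              obtain ⟨-, -, hbmin⟩ := PySem.Chars.findFrom_natCast_spec l ['!'] pos hplen hbne
              have hGB : G ≤ (PySem.Chars.findFrom l ['!'] (pos : Int) none).toNat := by omega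
              exact region_no l pos G '!' (fun i h1 h2 => hbmin i h1 (by omega))
          have hplainboth : ∀ x ∈ (l.drop pos).take (G - pos), x ≠ '>' ∧ x ≠ '!' :=
            fun x hx => ⟨hnog x hx, hnob x hx⟩
          have hsplit : l.drop pos = (l.drop pos).take (G - pos) ++ l.drop G := by
            conv_lhs => rw [← List.take_append_drop (G - pos) (l.drop pos)]
            rw [List.drop_drop]
            congr 2
            omega
          have hlen : ((l.drop pos).take (G - pos)).length = G - pos := by
            simp only [List.length_take, List.length_drop]
            omega
          have hA : readGarbageLoopA (l.drop pos) false (pos : Int) (String.ofList out)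
              = some (String.ofList (out ++ (l.drop pos).take (G - pos)),
                  (pos : Int) + ((l.drop pos).take (G - pos)).length + 1) := by
            conv_lhs => rw [hsplit]
            rw [loopA_skip_plain _ hplainboth, htg]
            simp [readGarbageLoopA]
          rw [hA, hslice, hlen]
          simp only [Option.some.injEq, Prod.mk.injEq]
          refine ⟨trivial, ?_⟩
          rw [hgcast]
          omega
        · -- the '!' comes first: A consumes the escaped pair, B jumps to b+2
          push_neg at hb
          obtain ⟨hbne, hble⟩ := hb
          obtain ⟨hbleI, hbpre, hbmin⟩ := PySem.Chars.findFrom_natCast_spec l ['!'] pos hplen hbne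
          set bI := PySem.Chars.findFrom l ['!'] (pos : Int) none with hbI
          have hb0 : 0 ≤ bI := le_trans (Int.natCast_nonneg pos) hbleI
          have hbcast : bI = (bI.toNat : Int) := (Int.toNat_of_nonneg hb0).symm
          set B := bI.toNat with hBdef
          have hposB : pos ≤ B := by omega
          obtain ⟨tb, htb⟩ := (prefix_singleton_iff _ _).mp hbpre
          have hBlen : B < l.length := by
            by_contra hc
            rw [List.drop_eq_nil_of_le (by omega)] at htb
            exact absurd htb (by simp)
          have hBG : B < G := by
            have hne : bI ≠ gI := by
              intro he
              have hBGeq : B = G := by omega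
              rw [hBGeq, htg] at htb
              exact absurd (List.head_eq_of_cons_eq htb) (by decide)
            omega
          have hnog : ∀ x ∈ (l.drop pos).take (B - pos), x ≠ '>' :=
            region_no l pos B '>' (fun i h1 h2 => hgmin i h1 (by omega))
          have hnob : ∀ x ∈ (l.drop pos).take (B - pos), x ≠ '!' :=
            region_no l pos B '!' (fun i h1 h2 => hbmin i h1 (by omega))
          have hplainboth : ∀ x ∈ (l.drop pos).take (B - pos), x ≠ '>' ∧ x ≠ '!' :=
            fun x hx => ⟨hnog x hx, hnob x hx⟩
          have hsplit : l.drop pos = (l.drop pos).take (B - pos) ++ l.drop B := by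
            conv_lhs => rw [← List.take_append_drop (B - pos) (l.drop pos)]
            rw [List.drop_drop]
            congr 2
            omega
          have hlen : ((l.drop pos).take (B - pos)).length = B - pos := by
            simp only [List.length_take, List.length_drop]
            omega
          have htb2 : tb = l.drop (B + 1) := by
            have h1 : l.drop B = l[B] :: l.drop (B + 1) := List.drop_eq_getElem_cons hBlen
            rw [htb] at h1
            exact List.tail_eq_of_cons_eq h1
          have hstep : readGarbageLoopA (l.drop (B + 1)) true ((B : Int) + 1)
                (String.ofList (out ++ (l.drop pos).take (B - pos)))
              = readGarbageLoopA (l.drop (B + 2)) false (((B + 2 : ℕ) : Int))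
                (String.ofList (out ++ (l.drop pos).take (B - pos))) := by
            cases hd : l.drop (B + 1) with
            | nil =>
              have hd2 : l.drop (B + 2) = [] := by
                apply List.drop_eq_nil_of_le
                have := congrArg List.length hd
                simp at this
                omega
              rw [hd2]
              simp [readGarbageLoopA]
            | cons x t' =>
              have ht' : t' = l.drop (B + 2) := by
                have h1 : l.drop (B + 2) = (l.drop (B + 1)).drop 1 := by
                  rw [List.drop_drop]
                rw [h1, hd]
                rfl
              rw [← ht']
              simp only [readGarbageLoopA, if_pos rfl]
              congr 1
          have hA : readGarbageLoopA (l.drop pos) false (pos : Int) (String.ofList out)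
              = readGarbageLoopA (l.drop (B + 2)) false (((B + 2 : ℕ) : Int))
                (String.ofList (out ++ (l.drop pos).take (B - pos))) := by
            conv_lhs => rw [hsplit]
            rw [loopA_skip_plain _ hplainboth, htb]
            have hne1 : ('!' : Char) ≠ '>' := by decide
            simp only [readGarbageLoopA, Bool.false_eq_true, if_false, if_neg hne1, if_pos rfl]
            rw [htb2, hlen]
            have harith : (pos : Int) + ((B - pos : ℕ) : Int) + 1 = (B : Int) + 1 := by omega
            rw [harith]
            exact hstep
          rw [hA, ih (B + 2) (out ++ (l.drop pos).take (B - pos)) (by omega)]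
          simp only [dif_neg hg, dif_neg (by push_neg; exact ⟨hbne, hble⟩ :
            ¬ (bI = -1 ∨ gI < bI))]
          congr 1
          rw [hbcast, PySem.List.slice_natCast]

-- ===== VERDICT (by name: the statement is the Claim_ definition above) =====
theorem read_garbage_spec : Claim_equal_read_garbage := by
  intro data _ _
  unfold Spec_read_garbage read_garbage read_garbage_alt
  have hemp : ("" : String) = String.ofList [] := String.toList_inj.mp (by simp)
  have h := loops_agree data.toList (data.toList.length) 1 [] (by omega)
  cases hg : PySem.Str.pyGet? data 0 with
  | none => rfl
  | some c =>
    by_cases hc : c = '<'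
    · subst hc
      have h' : readGarbageLoopA (List.drop 1 data.toList) false 1 "" =
          readGarbageLoopB data.toList 1 [] := by
        rw [hemp]
        exact_mod_cast h
      show (readGarbageLoopA (List.drop 1 data.toList) false 1 "").getD ("", 0) =
        (readGarbageLoopB data.toList 1 []).getD ("", 0)
      rw [h']
    · simp [hc]
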